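-- pv_equiv track=rewrite | github.com/ReshetnikovPavel/hw_ml4se | hw1/res.py | name_7
-- ===== SOURCE A (Python) =====
-- def name_7(name_8:str)->str:
--     name_96=[]
--     name_97=[word for word in name_8.split()if word]
--     for name_98 in range(len(name_97)):
--         name_96.append(name_97[name_98])
--         if(
--             name_98+1<len(name_97)
--             and(name_97[name_98][-1].isalnum()or name_97[name_98][-1]=="_")
--             and(name_97[name_98+1][0].isalnum()or name_97[name_98+1][0]=="_")
--         ):
--             name_96.append(" ")
--     return"".join(name_96)
-- ===== SOURCE B (Python) =====
-- def name_7(name_8: str) -> str: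
--     out = []
--     pending = False
--     for ch in name_8:
--         if ch.isspace():
--             if out:
--                 pending = True
--         else:
--             if pending and (out[-1].isalnum() or out[-1] == "_") and (ch.isalnum() or ch == "_"):
--                 out.append(" ")
--             pending = False
--             out.append(ch)
--     return "".join(out)
-- ===== Notes on version B (the rewrite author's own statement) =====
-- stated objective: alternative
-- what changed: Replaces split-into-words plus an index loop over adjacent word pairs by a single character-level scan carrying an output buffer and a pending-whitespace flag, never materialising the word list.
import Mathlib
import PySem

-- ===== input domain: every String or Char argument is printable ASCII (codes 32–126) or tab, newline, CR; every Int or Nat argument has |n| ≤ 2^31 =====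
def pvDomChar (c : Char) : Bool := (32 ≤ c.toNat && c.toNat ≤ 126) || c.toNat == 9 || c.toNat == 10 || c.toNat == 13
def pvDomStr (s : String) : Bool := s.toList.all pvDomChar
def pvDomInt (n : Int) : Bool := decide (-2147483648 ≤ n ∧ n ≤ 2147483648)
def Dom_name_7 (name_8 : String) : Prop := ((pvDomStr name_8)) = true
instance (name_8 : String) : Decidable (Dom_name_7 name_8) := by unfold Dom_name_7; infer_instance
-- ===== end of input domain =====

-- B replaces A's split-into-words plus index loop over adjacent word pairs by a single
-- character-level scan with a pending-whitespace flag (alternative decomposition, same O(n) cost).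

-- ===== PORT A =====
-- strings are handled as their character lists (PySem.Chars is the List Char form of PySem.Str);
-- aStep is the body of A's 'for name_98 in range(len(name_97))' loop
def aStep (ws : List (List Char)) (acc : List (List Char)) (i : Int) : List (List Char) :=
  let acc := acc ++ [PySem.List.pyGetD ws i []]
  if (decide (i + 1 < (ws.length : Int))
      && (PySem.Chars.isalnum (PySem.List.pyGetD (PySem.List.pyGetD ws i []) (-1) ' ')
          || PySem.List.pyGetD (PySem.List.pyGetD ws i []) (-1) ' ' == '_')
      && (PySem.Chars.isalnum (PySem.List.pyGetD (PySem.List.pyGetD ws (i+1) []) 0 ' ')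
          || PySem.List.pyGetD (PySem.List.pyGetD ws (i+1) []) 0 ' ' == '_'))
  then acc ++ [[' ']] else acc

def name_7 (name_8 : String) : String :=
  let name_97 := (PySem.Chars.split₀ name_8.toList).filter (fun w => !w.isEmpty)
  let name_96 := (PySem.List.pyRange 0 (name_97.length : Int) 1).foldl (aStep name_97) []
  String.ofList (PySem.Chars.join [] name_96)

-- ===== PORT B =====
-- bStep is the body of B's 'for ch in name_8' loop; state = (out, pending);
-- out[-1] is in range whenever Python reads it (pending implies out nonempty)
def bStep (st : List Char × Bool) (c : Char) : List Char × Bool :=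
  if PySem.Chars.isspace c then
    (st.1, if !st.1.isEmpty then true else st.2)
  else
    let out :=
      if st.2 && ((PySem.Chars.isalnum (PySem.List.pyGetD st.1 (-1) ' ')
                    || PySem.List.pyGetD st.1 (-1) ' ' == '_')
                  && (PySem.Chars.isalnum c || c == '_'))
      then st.1 ++ [' '] else st.1
    (out ++ [c], false)

def name_7_alt (name_8 : String) : String :=
  let st := name_8.toList.foldl bStep ([], false)
  String.ofList st.1

-- ===== PRECONDITION & SPEC =====
def Spec_name_7 (name_8 : String) (out : String) : Prop := out = name_7_alt name_8
instance (name_8 : String) (out : String) : Decidable (Spec_name_7 name_8 out) := by unfold Spec_name_7; infer_instance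

-- ===== CLAIM (what is proved, stated in full; the proofs are below) =====
def Claim_equal_name_7 : Prop := ∀ (name_8 : String), Dom_name_7 name_8 → Spec_name_7 name_8 (name_7 name_8)

-- ===== LEMMAS AND PROOFS =====

def wch (c : Char) : Bool := PySem.Chars.isalnum c || c == '_'
def sep (w v : List Char) : List Char :=
  if wch (PySem.List.pyGetD w (-1) ' ') && wch (PySem.List.pyGetD v 0 ' ') then [' '] else []
def J : List (List Char) → List Char
  | [] => []
  | [w] => w
  | w :: v :: r => w ++ sep w v ++ J (v :: r)

theorem J_cons_cons (w v : List Char) (r : List (List Char)) :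
    J (w :: v :: r) = w ++ sep w v ++ J (v :: r) := rfl

theorem J_ne_nil (ws : List (List Char)) (h : ws ≠ []) (hne : [] ∉ ws) : J ws ≠ [] := by
  match ws with
  | [w] => simp [J]; simp at hne; exact fun hh => hne (hh ▸ rfl)
  | w :: v :: r =>
    simp [J]
    intro hw
    simp [hw] at hne

theorem getLastD_append' (xs ys : List Char) (h : ys ≠ []) (d : Char) :
    (xs ++ ys).getLastD d = ys.getLastD d := by
  rw [List.getLastD_eq_getLast?, List.getLastD_eq_getLast?, List.getLast?_append_of_ne_nil _ h]

theorem J_last (ws : List (List Char)) (h : ws ≠ []) (hne : [] ∉ ws) (d : Char) :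
    (J ws).getLastD d = (ws.getLast h).getLastD d := by
  match ws with
  | [w] => simp [J]
  | w :: v :: r =>
    have ih := J_last (v :: r) (by simp) (by simp at hne ⊢; exact hne.2) d
    have hJ : J (v :: r) ≠ [] := J_ne_nil _ (by simp) (by simp at hne ⊢; exact hne.2)
    rw [J]
    rw [List.append_assoc, getLastD_append' _ _ (by simp [hJ]), getLastD_append' _ _ hJ, ih]
    simp [List.getLast_cons]

theorem J_snoc (ws : List (List Char)) (h : ws ≠ []) (v : List Char) :
    J (ws ++ [v]) = J ws ++ sep (ws.getLast h) v ++ v := by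
  match ws with
  | [w] => simp [J]
  | w :: u :: r =>
    have ih := J_snoc (u :: r) (by simp) v
    show J (w :: u :: (r ++ [v])) = _
    rw [J, show u :: (r ++ [v]) = (u :: r) ++ [v] from rfl, ih, J]
    simp [List.getLast_cons]

theorem J_snoc_char (ws : List (List Char)) (w : List Char) (hw : w ≠ []) (c : Char) :
    J (ws ++ [w ++ [c]]) = J (ws ++ [w]) ++ [c] := by
  match ws with
  | [] => simp [J]
  | x :: xs =>
    rw [J_snoc (x :: xs) (by simp) (w ++ [c]), J_snoc (x :: xs) (by simp) w]
    have : sep ((x :: xs).getLast (by simp)) (w ++ [c]) = sep ((x :: xs).getLast (by simp)) w := by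
      match w with
      | a :: w' => simp [sep]
    rw [this]; simp

theorem split_go_ne_nil (cs : List Char) (cur : List Char) (acc : List (List Char))
    (hacc : [] ∉ acc) : [] ∉ PySem.Chars.split₀.go cs cur acc := by
  induction cs generalizing cur acc with
  | nil =>
    rw [PySem.Chars.split₀.go]
    split
    · simpa using hacc
    · rename_i hc
      simp [List.isEmpty_iff] at hc ⊢
      exact ⟨hacc, hc⟩
  | cons c rest ih =>
    rw [PySem.Chars.split₀.go]
    split
    · split
      · exact ih _ _ hacc
      · rename_i hc
        apply ih
        simp [List.isEmpty_iff] at hc ⊢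
        exact ⟨hc, hacc⟩
    · exact ih _ _ hacc

theorem split_ne_nil (cs : List Char) : [] ∉ PySem.Chars.split₀ cs :=
  split_go_ne_nil cs [] [] (by simp)

theorem lemA (ws : List (List Char)) (rest : List (List Char)) :
    ∀ (k : Nat) (acc : List (List Char)), rest = ws.drop k →
    ((PySem.List.pyRange (k : Int) (ws.length : Int) 1).foldl (aStep ws) acc).flatten
      = acc.flatten ++ J rest := by
  induction rest with
  | nil =>
    intro k acc hk
    have hlen : ws.length ≤ k := by rw [← List.drop_eq_nil_iff]; exact hk.symm
    rw [PySem.List.pyRange_one_eq_nil (by exact_mod_cast hlen)]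
    simp [J]
  | cons w rest' ih =>
    intro k acc hk
    have hklt : k < ws.length := by
      by_contra hh
      rw [List.drop_eq_nil_iff.mpr (by omega)] at hk; simp at hk
    have hw : ws[k]? = some w := by
      have h0 : (ws.drop k)[0]? = ws[k+0]? := List.getElem?_drop
      rw [← hk] at h0; simpa using h0.symm
    have hdrop1 : rest' = ws.drop (k + 1) := by
      have : ws.drop (k+1) = (ws.drop k).drop 1 := by rw [List.drop_drop]
      rw [this, ← hk]; simp
    rw [PySem.List.pyRange_one_cons (by exact_mod_cast hklt)]
    rw [List.foldl_cons]
    have hgetk : PySem.List.pyGetD ws (k : Int) [] = w := by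
      simp [PySem.List.pyGetD_natCast, List.getD, hw]
    cases rest' with
    | nil =>
      have hlen1 : ws.length ≤ k + 1 := by rw [← List.drop_eq_nil_iff]; exact hdrop1.symm
      have hlen' : ws.length = k + 1 := by omega
      have : aStep ws acc (k : Int) = acc ++ [w] := by
        simp [aStep, hgetk, hlen']
      rw [this, show ((k:Int) + 1) = ((k+1 : Nat) : Int) by push_cast; ring,
          PySem.List.pyRange_one_eq_nil (by exact_mod_cast hlen1)]
      simp [J]
    | cons v r =>
      have hk1 : k + 1 < ws.length := by
        by_contra hh
        rw [List.drop_eq_nil_iff.mpr (by omega)] at hdrop1; simp at hdrop1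
      have hv : ws[k+1]? = some v := by
        have h0 : (ws.drop (k+1))[0]? = ws[(k+1)+0]? := List.getElem?_drop
        rw [← hdrop1] at h0; simpa using h0.symm
      obtain ⟨hvlt, hveq⟩ := List.getElem?_eq_some_iff.mp hv
      have hgetk1 : PySem.List.pyGetD ws ((k : Int) + 1) [] = v := by
        rw [PySem.List.pyGetD_eq_getElem ws [] (by omega) (by exact_mod_cast hk1)]
        simpa [show ((k:Int) + 1).toNat = k + 1 by omega] using hveq
      have hdec : decide ((k : Int) + 1 < (ws.length : Int)) = true := by
        simp; exact_mod_cast hk1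
      have hstep : aStep ws acc (k : Int) = acc ++ [w] ++ (if wch (PySem.List.pyGetD w (-1) ' ') && wch (PySem.List.pyGetD v 0 ' ') then [[' ']] else []) := by
        simp only [aStep, hgetk, hgetk1, hdec, Bool.true_and, wch]
        split_ifs with h1 <;> simp
      have hcast : ((k:Int) + 1) = ((k+1 : Nat) : Int) := by push_cast; ring
      rw [hstep, hcast, ih (k+1) _ hdrop1]
      rw [J_cons_cons]
      simp only [sep, wch]
      split_ifs <;> simp

def Wd (cur : List Char) (acc : List (List Char)) : List (List Char) :=
  acc.reverse ++ (if cur.isEmpty then [] else [cur.reverse])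

def Pd (cur : List Char) (acc : List (List Char)) : Bool :=
  cur.isEmpty && !acc.isEmpty

theorem pyGetD_neg_one_getLastD (xs : List Char) (hx : xs ≠ []) (d : Char) :
    PySem.List.pyGetD xs (-1) d = xs.getLastD d := by
  rw [PySem.List.pyGetD_neg_one xs d hx, List.getLastD_eq_getLast?,
      List.getLast?_eq_getLast_of_ne_nil hx]
  simp

theorem lemB (cs : List Char) :
    ∀ (cur : List Char) (acc : List (List Char)), [] ∉ acc →
    (cs.foldl bStep (J (Wd cur acc), Pd cur acc)).1 = J (PySem.Chars.split₀.go cs cur acc) := by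
  induction cs with
  | nil =>
    intro cur acc hacc
    rw [PySem.Chars.split₀.go]
    simp only [List.foldl_nil]
    by_cases hcur : cur.isEmpty = true
    · rw [if_pos hcur]; simp [Wd, hcur]
    · rw [if_neg hcur]; simp [Wd, hcur]
  | cons c rest ih =>
    intro cur acc hacc
    rw [PySem.Chars.split₀.go, List.foldl_cons]
    by_cases hsp : PySem.Chars.isspace c = true
    · rw [if_pos hsp]
      have hb : bStep (J (Wd cur acc), Pd cur acc) c
          = (J (Wd cur acc), if !(J (Wd cur acc)).isEmpty then true else Pd cur acc) := by
        simp [bStep, hsp]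
      by_cases hcur : cur.isEmpty = true
      · have hcur' : cur = [] := List.isEmpty_iff.mp hcur
        subst hcur'
        rw [if_pos hcur]
        rcases acc with _ | ⟨a, acc'⟩
        · have hpend : (if !(J (Wd [] [])).isEmpty then true else Pd [] []) = Pd [] [] := by
            simp [Wd, Pd, J]
          rw [hb, hpend]
          exact ih [] [] hacc
        · have hWne : Wd [] (a :: acc') ≠ [] := by simp [Wd]
          have hWmem : [] ∉ Wd [] (a :: acc') := by
            have hW0 : Wd [] (a :: acc') = (a :: acc').reverse := by simp [Wd]
            rw [hW0, List.mem_reverse]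
            exact hacc
          have hJne := J_ne_nil _ hWne hWmem
          have hpend : (if !(J (Wd [] (a :: acc'))).isEmpty then true else Pd [] (a :: acc'))
              = Pd [] (a :: acc') := by
            simp [hJne, Pd]
          rw [hb, hpend]
          exact ih [] (a :: acc') hacc
      · have hcurne : cur ≠ [] := by simpa [List.isEmpty_iff] using hcur
        rw [if_neg hcur]
        have hrevne : cur.reverse ≠ [] := by simpa using hcurne
        have hacc' : [] ∉ (cur.reverse :: acc) := by
          simp only [List.mem_cons, not_or]
          exact ⟨fun h => hrevne h.symm, hacc⟩
        have hW : Wd cur acc = Wd [] (cur.reverse :: acc) := by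
          simp [Wd, hcur]
        have hWne : Wd cur acc ≠ [] := by simp [Wd, hcur]
        have hWmem : [] ∉ Wd cur acc := by
          simp only [Wd, if_neg hcur, List.mem_append, List.mem_reverse,
            List.mem_singleton, not_or]
          exact ⟨by simpa using hacc, fun h => hrevne h.symm⟩
        have hJne := J_ne_nil _ hWne hWmem
        have hpend : (if !(J (Wd cur acc)).isEmpty then true else Pd cur acc) = true := by
          simp [hJne]
        have hP : Pd [] (cur.reverse :: acc) = true := by simp [Pd]
        rw [hb, hpend, hW, ← hP]
        exact ih [] (cur.reverse :: acc) hacc'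
    · rw [if_neg hsp]
      by_cases hcur : cur.isEmpty = true
      · have hcur' : cur = [] := List.isEmpty_iff.mp hcur
        subst hcur'
        rcases acc with _ | ⟨a, acc'⟩
        · have hb : bStep (J (Wd [] []), Pd [] []) c = (J (Wd [c] []), Pd [c] []) := by
            simp [bStep, hsp, Wd, Pd, J]
          rw [hb]
          exact ih [c] [] (by simp)
        · -- pending boundary: the separator decision happens here
          set acc := a :: acc' with haccdef
          have haccne : acc ≠ [] := by simp [haccdef]
          have hrevne : acc.reverse ≠ [] := by simpa using haccne
          have hWmem : [] ∉ acc.reverse := by simpa using hacc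
          have hJne := J_ne_nil acc.reverse hrevne hWmem
          have hlastne : acc.reverse.getLast hrevne ≠ [] := by
            intro h
            exact hWmem (h ▸ List.getLast_mem hrevne)
          have hlast : PySem.List.pyGetD (J acc.reverse) (-1) ' '
              = PySem.List.pyGetD (acc.reverse.getLast hrevne) (-1) ' ' := by
            rw [pyGetD_neg_one_getLastD _ hJne, pyGetD_neg_one_getLastD _ hlastne,
                J_last acc.reverse hrevne hWmem]
          have hW0 : Wd [] acc = acc.reverse := by simp [Wd]
          have hWc : Wd [c] acc = acc.reverse ++ [[c]] := by simp [Wd]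
          have hP0 : Pd [] acc = true := by simp [Pd, haccdef]
          have hPc : Pd [c] acc = false := by simp [Pd]
          have hb : bStep (J (Wd [] acc), Pd [] acc) c = (J (Wd [c] acc), Pd [c] acc) := by
            rw [hW0, hWc, hP0, hPc]
            simp only [bStep, hsp, Bool.false_eq_true, if_false, Bool.true_and]
            rw [J_snoc acc.reverse hrevne [c]]
            simp only [sep, wch, hlast, PySem.List.pyGetD_zero_cons]
            split_ifs <;> simp
          rw [hb]
          exact ih [c] acc hacc
      · have hcurne : cur ≠ [] := by simpa [List.isEmpty_iff] using hcur
        have hrevne : cur.reverse ≠ [] := by simpa using hcurne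
        have hWv : Wd cur acc = acc.reverse ++ [cur.reverse] := by simp [Wd, hcur]
        have hWc : Wd (c :: cur) acc = acc.reverse ++ [cur.reverse ++ [c]] := by
          simp [Wd]
        have hPv : Pd cur acc = false := by simp [Pd, hcurne]
        have hPc : Pd (c :: cur) acc = false := by simp [Pd]
        have hb : bStep (J (Wd cur acc), Pd cur acc) c = (J (Wd (c :: cur) acc), Pd (c :: cur) acc) := by
          rw [hWv, hWc, hPv, hPc]
          simp only [bStep, hsp, Bool.false_eq_true, if_false, Bool.false_and]
          rw [J_snoc_char acc.reverse cur.reverse hrevne c]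
        rw [hb]
        exact ih (c :: cur) acc hacc

theorem join_nil_flatten (l : List (List Char)) : PySem.Chars.join [] l = l.flatten := by
  simp [PySem.Chars.join, List.intercalate]
  induction l with
  | nil => simp
  | cons x xs ih => cases xs <;> simp_all [List.intersperse]

theorem filter_split (cs : List Char) :
    (PySem.Chars.split₀ cs).filter (fun w => !w.isEmpty) = PySem.Chars.split₀ cs := by
  apply List.filter_eq_self.mpr
  intro w hw
  simp
  intro h
  exact split_ne_nil cs (h ▸ hw)

theorem A_eq (s : String) : name_7 s = String.ofList (J (PySem.Chars.split₀ s.toList)) := by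
  simp only [name_7, filter_split, join_nil_flatten]
  congr 1
  have := lemA (PySem.Chars.split₀ s.toList) (PySem.Chars.split₀ s.toList) 0 [] (by simp)
  simpa using this

theorem B_eq (s : String) : name_7_alt s = String.ofList (J (PySem.Chars.split₀ s.toList)) := by
  simp only [name_7_alt]
  have h0 : (([] : List Char), false) = (J (Wd [] []), Pd [] []) := by simp [Wd, Pd, J]
  rw [h0, lemB s.toList [] [] (by simp)]
  rfl

-- ===== VERDICT (by name: the statement is the Claim_ definition above) =====
theorem name_7_spec : Claim_equal_name_7 := by
  intro s _
  unfold Spec_name_7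
  rw [A_eq, B_eq]
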